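-- pv_equiv track=rewrite | github.com/JoshXie0809/apa_format | transform.py | author_process
-- ===== SOURCE A (Python) =====
-- def author_process(author_str):
--     authors = author_str.split(" and")
--     ret = ""
--     n = len(authors)
--     for i, author in enumerate(authors):
--         first_comma = False
--         for letter in author:
--             if not first_comma:
--                 ret += letter
--
--             if letter == ",":
--                 first_comma = True
--                 ret += " "
--
--             if first_comma & letter.isupper():
--                 ret += letter + ". "
--
--         if i + 1 < n - 1:
--             ret = ret[:-1]
--             ret += ","
--         elif i + 1 == n - 1:
--             ret += "\\&"
--
--     return ret
-- ===== SOURCE B (Python) =====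
-- def author_process(author_str):
--     # stage 1: format each author segment independently (slice parse, no flag)
--     def fmt(a):
--         if "," not in a:
--             return a
--         head, tail = a.split(",", 1)
--         return head + ", " + "".join(
--             " " if c == "," else c + ". " if c.isupper() else "" for c in tail)
--     pieces = [fmt(a) for a in author_str.split(" and")]
--     # stage 2: join the pieces, matching on how many remain instead of indices
--     acc = ""
--     k = 0
--     while len(pieces) - k > 2:
--         acc = (acc + pieces[k])[:-1] + ","
--         k += 1
--     if len(pieces) - k == 2:
--         return acc + pieces[k] + "\\&" + pieces[k + 1]
--     return acc + pieces[k]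
-- ===== Notes on version B (the rewrite author's own statement) =====
-- stated objective: alternative
-- what changed: Two staged passes instead of one flag-driven state machine: first map each author segment (after the and-separator split) to its formatted piece via a slice parse at the first comma, then join the pieces with a loop that matches on how many pieces remain (trim-and-comma while more than two remain, ampersand separator before the last) instead of A's enumerate-with-index branch arithmetic; pieces are built by join instead of per-character concatenation.
import Mathlib
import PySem

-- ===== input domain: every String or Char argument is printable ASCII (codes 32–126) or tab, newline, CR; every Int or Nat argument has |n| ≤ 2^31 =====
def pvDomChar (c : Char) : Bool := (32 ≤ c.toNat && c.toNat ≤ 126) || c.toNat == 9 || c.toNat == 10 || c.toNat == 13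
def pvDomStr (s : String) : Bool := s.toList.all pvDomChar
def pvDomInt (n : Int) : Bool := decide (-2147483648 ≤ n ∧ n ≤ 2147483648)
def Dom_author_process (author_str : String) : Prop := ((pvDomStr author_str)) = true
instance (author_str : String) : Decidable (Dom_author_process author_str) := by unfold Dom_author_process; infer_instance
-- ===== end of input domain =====

-- B reworks A's single flag-driven state machine into two staged passes (format each
-- segment via a split(',',1) slice parse, then join pieces by remaining count); objective: alternative.

-- ===== PORT A =====
-- one step of A's inner 'for letter in author' loop; state = (ret, first_comma)
def apStepA (st : List Char × Bool) (c : Char) : List Char × Bool :=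
  let ret := if !st.2 then st.1 ++ [c] else st.1            -- if not first_comma: ret += letter
  let fc  := if c = ',' then true else st.2                 -- if letter == ",": first_comma = True
  let ret := if c = ',' then ret ++ [' '] else ret          --                    ret += " "
  let ret := if fc && PySem.Chars.isupper c then ret ++ [c, '.', ' '] else ret
  (ret, fc)

-- A's outer loop over 'enumerate(authors)'; n is len(authors) (n ≥ 1 here, so Nat '- 1' = Python's)
def apOuterA (authors : List (List Char)) (i n : Nat) (ret : List Char) : List Char :=
  match authors with
  | [] => ret
  | a :: rest =>
    let ret := (a.foldl apStepA (ret, false)).1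
    let ret := if i + 1 < n - 1 then ret.dropLast ++ [',']
               else if i + 1 = n - 1 then ret ++ ['\\', '&'] else ret
    apOuterA rest (i + 1) n ret

def author_process (author_str : String) : String :=
  let authors := PySem.Chars.splitOn author_str.toList " and".toList
  String.mk (apOuterA authors 0 authors.length [])

-- ===== PORT B =====
-- per-character contribution of the tail after the first comma (the join-comprehension)
def apContrib (c : Char) : List Char :=
  if c = ',' then [' '] else if PySem.Chars.isupper c then [c, '.', ' '] else []

-- B's fmt: a.split(",", 1) on a single-char separator = takeWhile / tail-of-dropWhile
def apFmt (a : List Char) : List Char :=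
  if ',' ∈ a then
    a.takeWhile (· ≠ ',') ++ [',', ' '] ++ ((a.dropWhile (· ≠ ',')).tail).flatMap apContrib
  else a

-- B's joining loop: recursion on the remaining pieces, matched by how many remain
def apJoin : List (List Char) → List Char → List Char
  | [], acc => acc
  | [p], acc => acc ++ p
  | [p, q], acc => acc ++ p ++ ['\\', '&'] ++ q
  | p :: rest, acc => apJoin rest ((acc ++ p).dropLast ++ [','])

def author_process_alt (author_str : String) : String :=
  String.mk (apJoin ((PySem.Chars.splitOn author_str.toList " and".toList).map apFmt) [])

-- ===== PRECONDITION & SPEC =====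
def Spec_author_process (author_str : String) (out : String) : Prop := out = author_process_alt author_str
instance (author_str : String) (out : String) : Decidable (Spec_author_process author_str out) := by unfold Spec_author_process; infer_instance

-- ===== CLAIM (what is proved, stated in full; the proofs are below) =====
def Claim_equal_author_process : Prop := ∀ (author_str : String), Dom_author_process author_str → Spec_author_process author_str (author_process author_str)

-- ===== LEMMAS AND PROOFS =====

-- after the first comma, A's inner loop appends exactly the per-character contributions
theorem apFoldA_true (a : List Char) (ret : List Char) :
    a.foldl apStepA (ret, true) = (ret ++ a.flatMap apContrib, true) := by
  induction a generalizing ret with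
  | nil => simp
  | cons c cs ih =>
    by_cases hc : c = ','
    · subst hc
      simp [List.foldl_cons, apStepA, apContrib, PySem.Chars.isupper, ih]
    · by_cases hu : PySem.Chars.isupper c
      · simp [List.foldl_cons, apStepA, apContrib, hc, hu, ih]
      · simp [List.foldl_cons, apStepA, apContrib, hc, hu, ih]

-- A's whole inner loop (flag initially false) appends B's formatted piece
theorem apInner_eq (a : List Char) (ret : List Char) :
    (a.foldl apStepA (ret, false)).1 = ret ++ apFmt a := by
  induction a generalizing ret with
  | nil => simp [apFmt]
  | cons c cs ih =>
    by_cases hc : c = ','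
    · subst hc
      have h1 : apStepA (ret, false) ',' = (ret ++ [','] ++ [' '], true) := by
        simp [apStepA, PySem.Chars.isupper]
      simp [List.foldl_cons, h1, apFoldA_true, apFmt]
    · have h1 : apStepA (ret, false) c = (ret ++ [c], false) := by
        simp [apStepA, hc]
      rw [List.foldl_cons, h1, ih]
      by_cases hmem : ',' ∈ cs
      · have h2 : ',' ∈ c :: cs := List.mem_cons_of_mem _ hmem
        simp [apFmt, h2, hmem, hc]
      · have h2 : ¬ (',' ∈ c :: cs) := by
          intro h; rcases List.mem_cons.mp h with h | h
          · exact hc h.symm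
          · exact hmem h
        simp [apFmt, h2, hmem]

-- A's indexed outer loop = B's join of the mapped pieces, when n = i + remaining length
theorem apOuter_eq (authors : List (List Char)) (i : Nat) (ret : List Char) :
    apOuterA authors i (i + authors.length) ret = apJoin (authors.map apFmt) ret := by
  induction authors generalizing i ret with
  | nil => rfl
  | cons a rest ih =>
    match rest with
    | [] =>
      have h1 : ¬ (i + 1 < i + [a].length - 1) := by
        simp only [List.length_cons, List.length_nil]; omega
      have h2 : ¬ (i + 1 = i + [a].length - 1) := by
        simp only [List.length_cons, List.length_nil]; omega
      conv_lhs => rw [apOuterA]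
      simp only [apInner_eq]
      rw [if_neg h1, if_neg h2]
      simp [apOuterA, apJoin]
    | [b] =>
      have h1 : ¬ (i + 1 < i + [a, b].length - 1) := by
        simp only [List.length_cons, List.length_nil]; omega
      have h2 : i + 1 = i + [a, b].length - 1 := by
        simp only [List.length_cons, List.length_nil]; omega
      have h3 : ¬ (i + 1 + 1 < i + [a, b].length - 1) := by
        simp only [List.length_cons, List.length_nil]; omega
      have h4 : ¬ (i + 1 + 1 = i + [a, b].length - 1) := by
        simp only [List.length_cons, List.length_nil]; omega
      conv_lhs => rw [apOuterA]
      simp only [apInner_eq]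
      rw [if_neg h1, if_pos h2]
      conv_lhs => rw [apOuterA]
      simp only [apInner_eq]
      rw [if_neg h3, if_neg h4]
      simp [apOuterA, apJoin]
    | b :: c :: rest' =>
      have h1 : i + 1 < i + (a :: b :: c :: rest').length - 1 := by
        simp only [List.length_cons, List.length_nil]; omega
      have hn : i + (a :: b :: c :: rest').length = (i + 1) + (b :: c :: rest').length := by
        simp only [List.length_cons, List.length_nil]; omega
      conv_lhs => rw [apOuterA]
      simp only [apInner_eq]
      rw [if_pos h1, hn, ih (i + 1)]
      simp [apJoin]

-- ===== VERDICT (by name: the statement is the Claim_ definition above) =====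
theorem author_process_spec : Claim_equal_author_process := by
  intro s _
  have h := apOuter_eq (PySem.Chars.splitOn s.toList " and".toList) 0 []
  rw [Nat.zero_add] at h
  unfold Spec_author_process
  simp only [author_process, author_process_alt]
  exact congrArg String.mk h
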